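-- pv_equiv track=rewrite | github.com/pypi-data/pypi-mirror-290 | packages/rst-fast-parse/rst_fast_parse-0.0.14-py3-none-any.whl/rst_fast_parse/_opqrstu/ccccbbbb.py | gAAAAABmvnuPNZUGaLglawhsuL6CWM12r4CIhs8FM4Cb0iVwQwYgrCORz0enmzKgG_XZOHhbKgDuH_wh3N_47Jza3lMXCmespg__
-- ===== SOURCE A (Python) =====
-- from typing import NewType
--
-- EscapedStr = NewType('EscapedStr', str)
--
-- def gAAAAABmvnuPNZUGaLglawhsuL6CWM12r4CIhs8FM4Cb0iVwQwYgrCORz0enmzKgG_XZOHhbKgDuH_wh3N_47Jza3lMXCmespg__(text: str) -> EscapedStr: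
--     parts = []
--     start = 0
--     while True:
--         found = text.find('\\', start)
--         if found == -1:
--             parts.append(text[start:])
--             return EscapedStr(''.join(parts))
--         parts.append(text[start:found])
--         parts.append('\x00' + text[found + 1:found + 2])
--         start = found + 2
-- ===== SOURCE B (Python) =====
-- from typing import NewType
--
-- EscapedStr = NewType('EscapedStr', str)
--
-- def gAAAAABmvnuPNZUGaLglawhsuL6CWM12r4CIhs8FM4Cb0iVwQwYgrCORz0enmzKgG_XZOHhbKgDuH_wh3N_47Jza3lMXCmespg__(text: str) -> EscapedStr:
--     out = []
--     i = 0
--     n = len(text)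
--     while i < n:
--         ch = text[i]
--         if ch == '\\':
--             out.append('\x00')
--             if i + 1 < n:
--                 out.append(text[i + 1])
--             i += 2
--         else:
--             out.append(ch)
--             i += 1
--     return EscapedStr(''.join(out))
-- ===== Notes on version B (the rewrite author's own statement) =====
-- stated objective: alternative
-- what changed: Replaces the find-jump-and-slice loop (repeated str.find plus slice copies between backslashes) with a single per-character index scan that appends characters one at a time, consuming two positions at each backslash.
import Mathlib
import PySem

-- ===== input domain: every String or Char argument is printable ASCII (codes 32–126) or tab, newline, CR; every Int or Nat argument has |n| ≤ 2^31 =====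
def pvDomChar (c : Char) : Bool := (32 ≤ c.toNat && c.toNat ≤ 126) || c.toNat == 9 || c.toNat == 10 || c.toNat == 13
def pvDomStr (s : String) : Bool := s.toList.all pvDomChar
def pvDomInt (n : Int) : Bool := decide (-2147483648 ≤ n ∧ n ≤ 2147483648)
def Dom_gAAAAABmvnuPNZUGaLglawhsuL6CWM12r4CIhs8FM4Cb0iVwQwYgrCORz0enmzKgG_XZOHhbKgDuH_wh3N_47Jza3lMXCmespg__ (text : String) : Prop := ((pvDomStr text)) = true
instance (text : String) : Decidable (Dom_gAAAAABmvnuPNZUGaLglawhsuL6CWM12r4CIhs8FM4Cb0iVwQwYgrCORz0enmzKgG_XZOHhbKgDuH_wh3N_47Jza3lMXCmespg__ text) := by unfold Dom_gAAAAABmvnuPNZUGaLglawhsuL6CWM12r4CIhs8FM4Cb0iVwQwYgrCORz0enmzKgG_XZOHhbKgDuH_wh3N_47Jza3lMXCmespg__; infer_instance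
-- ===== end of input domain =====

-- B replaces A's find-jump-and-slice loop by a single per-character scan; return values proved equal on Dom (alternative decomposition, same cost).

-- ===== PORT A =====
-- A works on the string's code points: parts is the list of accumulated pieces,
-- start the search position; text.find('\\', start) is PySem.Chars.findFrom.

-- needed by the port's termination proof (cited in decreasing_by):
lemma pvFindFrom_past (s : List Char) (k : Nat) (h : s.length ≤ k) :
    PySem.Chars.findFrom s ['\\'] (k : Int) none = -1 := by
  have h0 : PySem.Chars.find (List.drop k s) ['\\'] = -1 := by
    rw [PySem.Chars.find_eq_neg_one_iff]
    simp [List.drop_eq_nil_of_le h]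
  simp only [PySem.Chars.findFrom]
  split_ifs with h1 h2 h3 <;> simp_all <;> omega

lemma pvFindFrom_lt_length (s : List Char) (start : Nat)
    (h : ¬ PySem.Chars.findFrom s ['\\'] (start : Int) none = -1) :
    (start : Int) ≤ PySem.Chars.findFrom s ['\\'] (start : Int) none ∧
      (PySem.Chars.findFrom s ['\\'] (start : Int) none).toNat < s.length := by
  by_cases hs : start ≤ s.length
  · obtain ⟨h1, h2, _⟩ := PySem.Chars.findFrom_natCast_spec s ['\\'] start hs h
    refine ⟨h1, ?_⟩
    rcases h2 with ⟨t, ht⟩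
    have := congrArg List.length ht
    simp [List.length_drop] at this
    omega
  · exact absurd (pvFindFrom_past s start (by omega)) h

def pvFindLoop (s : List Char) (parts : List (List Char)) (start : Nat) : List Char :=
  let found := PySem.Chars.findFrom s ['\\'] (start : Int) none
  if h : found = -1 then
    (parts ++ [PySem.List.slice s (some (start : Int)) none]).flatten
  else
    pvFindLoop s
      (parts ++ [PySem.List.slice s (some (start : Int)) (some found),
                 '\x00' :: PySem.List.slice s (some (found + 1)) (some (found + 2))])
      (found.toNat + 2)
termination_by s.length + 1 - start
decreasing_by
  obtain ⟨h1, h2⟩ := pvFindFrom_lt_length s start h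
  omega

def gAAAAABmvnuPNZUGaLglawhsuL6CWM12r4CIhs8FM4Cb0iVwQwYgrCORz0enmzKgG_XZOHhbKgDuH_wh3N_47Jza3lMXCmespg__ (text : String) : String :=
  String.ofList (pvFindLoop text.toList [] 0)

-- ===== PORT B =====
-- B's index scan: while i < n consume one char, or two at a backslash;
-- transliterated as structural recursion on the remaining suffix of code points.
def pvScan : List Char → List Char
  | [] => []
  | c :: rest =>
    if c = '\\' then
      match rest with
      | [] => ['\x00']
      | d :: rest' => '\x00' :: d :: pvScan rest'
    else c :: pvScan rest

def gAAAAABmvnuPNZUGaLglawhsuL6CWM12r4CIhs8FM4Cb0iVwQwYgrCORz0enmzKgG_XZOHhbKgDuH_wh3N_47Jza3lMXCmespg___alt (text : String) : String :=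
  String.ofList (pvScan text.toList)

-- ===== PRECONDITION & SPEC =====
def Spec_gAAAAABmvnuPNZUGaLglawhsuL6CWM12r4CIhs8FM4Cb0iVwQwYgrCORz0enmzKgG_XZOHhbKgDuH_wh3N_47Jza3lMXCmespg__ (text : String) (out : String) : Prop := out = gAAAAABmvnuPNZUGaLglawhsuL6CWM12r4CIhs8FM4Cb0iVwQwYgrCORz0enmzKgG_XZOHhbKgDuH_wh3N_47Jza3lMXCmespg___alt text
instance (text : String) (out : String) : Decidable (Spec_gAAAAABmvnuPNZUGaLglawhsuL6CWM12r4CIhs8FM4Cb0iVwQwYgrCORz0enmzKgG_XZOHhbKgDuH_wh3N_47Jza3lMXCmespg__ text out) := by unfold Spec_gAAAAABmvnuPNZUGaLglawhsuL6CWM12r4CIhs8FM4Cb0iVwQwYgrCORz0enmzKgG_XZOHhbKgDuH_wh3N_47Jza3lMXCmespg__; infer_instance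

-- ===== CLAIM (what is proved, stated in full; the proofs are below) =====
def Claim_equal_gAAAAABmvnuPNZUGaLglawhsuL6CWM12r4CIhs8FM4Cb0iVwQwYgrCORz0enmzKgG_XZOHhbKgDuH_wh3N_47Jza3lMXCmespg__ : Prop := ∀ (text : String), Dom_gAAAAABmvnuPNZUGaLglawhsuL6CWM12r4CIhs8FM4Cb0iVwQwYgrCORz0enmzKgG_XZOHhbKgDuH_wh3N_47Jza3lMXCmespg__ text → Spec_gAAAAABmvnuPNZUGaLglawhsuL6CWM12r4CIhs8FM4Cb0iVwQwYgrCORz0enmzKgG_XZOHhbKgDuH_wh3N_47Jza3lMXCmespg__ text (gAAAAABmvnuPNZUGaLglawhsuL6CWM12r4CIhs8FM4Cb0iVwQwYgrCORz0enmzKgG_XZOHhbKgDuH_wh3N_47Jza3lMXCmespg__ text)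

-- ===== LEMMAS AND PROOFS =====
lemma pvScan_of_not_mem (l : List Char) (h : '\\' ∉ l) : pvScan l = l := by
  induction l with
  | nil => rfl
  | cons c rest ih =>
    simp only [List.mem_cons, not_or] at h
    rw [pvScan.eq_def]
    simp [Ne.symm h.1, ih h.2]

lemma pvScan_append (m t : List Char) (h : '\\' ∉ m) :
    pvScan (m ++ t) = m ++ pvScan t := by
  induction m with
  | nil => rfl
  | cons c rest ih =>
    simp only [List.mem_cons, not_or] at h
    rw [List.cons_append, pvScan.eq_def]
    simp [Ne.symm h.1, ih h.2]

lemma pvScan_cons_backslash (t : List Char) :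
    pvScan ('\\' :: t) = '\x00' :: (t.take 1 ++ pvScan (t.drop 1)) := by
  cases t <;> simp [pvScan]

lemma pvPrefix_backslash {s : List Char} {i : Nat} (hi : i < s.length) :
    ['\\'] <+: s.drop i ↔ s[i] = '\\' := by
  rw [List.drop_eq_getElem_cons hi]
  constructor
  · rintro ⟨t, ht⟩
    simp only [List.singleton_append, List.cons.injEq] at ht
    exact ht.1.symm
  · intro h
    exact ⟨_, by rw [h]; rfl⟩

lemma pvFindLoop_eq (s : List Char) (start : Nat) (parts : List (List Char)) :
    pvFindLoop s parts start = parts.flatten ++ pvScan (s.drop start) := by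
  rw [pvFindLoop]
  by_cases h : PySem.Chars.findFrom s ['\\'] (start : Int) none = -1
  · simp only [h, dite_true]
    have hnm : '\\' ∉ s.drop start := by
      by_cases hs : start ≤ s.length
      · have := (PySem.Chars.findFrom_natCast_eq_neg_one_iff s ['\\'] start hs).mp h
        intro hmem
        exact this ((List.singleton_infix_iff '\\' _).mpr hmem)
      · simp [List.drop_eq_nil_of_le (by omega : s.length ≤ start)]
    rw [pvScan_of_not_mem _ hnm, PySem.List.slice_from_natCast]
    simp
  · simp only [h, dite_false]
    obtain ⟨h1, h2⟩ := pvFindFrom_lt_length s start h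
    set found := PySem.Chars.findFrom s ['\\'] (start : Int) none with hf
    set f : Nat := found.toNat with hfn
    have hfound : found = (f : Int) := by omega
    have hstart_le : start ≤ s.length := by omega
    have hsf : start ≤ f := by omega
    obtain ⟨-, hpre, hmin⟩ := PySem.Chars.findFrom_natCast_spec s ['\\'] start hstart_le h
    rw [← hf] at hpre hmin
    have hsf2 : s[f] = '\\' := (pvPrefix_backslash h2).mp hpre
    have hrec := pvFindLoop_eq s (f + 2)
      (parts ++ [PySem.List.slice s (some (start : Int)) (some found),
                 '\x00' :: PySem.List.slice s (some (found + 1)) (some (found + 2))])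
    rw [hfound] at hrec ⊢
    rw [hrec]
    have hs1 : PySem.List.slice s (some (start : Int)) (some (f : Int)) =
        (s.drop start).take (f - start) := PySem.List.slice_natCast s start f
    have hs2 : PySem.List.slice s (some ((f : Int) + 1)) (some ((f : Int) + 2)) =
        (s.drop (f + 1)).take 1 := by
      have : ((f : Int) + 1) = ((f + 1 : Nat) : Int) := by push_cast; ring
      rw [this, show ((f : Int) + 2) = (((f + 1 : Nat) : Int) + (1 : Nat)) by push_cast; ring]
      exact PySem.List.slice_natCast_add s (f + 1) 1
    -- the middle piece contains no backslash
    have hnm : '\\' ∉ (s.drop start).take (f - start) := by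
      intro hmem
      obtain ⟨j, hj, hget⟩ := List.getElem_of_mem hmem
      have hjlt : j < f - start := by
        have := hj; simp [List.length_take, List.length_drop] at this; omega
      have hgj : s[start + j]'(by omega) = '\\' := by
        have := hget
        rw [List.getElem_take, List.getElem_drop] at this
        exact this
      exact hmin (start + j) (by omega) (by omega)
        ((pvPrefix_backslash (by omega)).mpr hgj)
    -- decompose the suffix at the backslash
    have hdecomp : s.drop start = (s.drop start).take (f - start) ++ '\\' :: s.drop (f + 1) := by
      have h3 : s.drop f = '\\' :: s.drop (f + 1) := by
        rw [List.drop_eq_getElem_cons h2, hsf2]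
      have h4 : (s.drop start).drop (f - start) = s.drop f := by
        rw [List.drop_drop]; congr 1; omega
      rw [← h3, ← h4, List.take_append_drop]
    rw [hdecomp, pvScan_append _ _ hnm, pvScan_cons_backslash]
    have hdd : (s.drop (f + 1)).drop 1 = s.drop (f + 2) := by
      rw [List.drop_drop]
    rw [hdd, hs1, hs2]
    simp
termination_by s.length + 1 - start
decreasing_by omega


-- ===== VERDICT (by name: the statement is the Claim_ definition above) =====
theorem gAAAAABmvnuPNZUGaLglawhsuL6CWM12r4CIhs8FM4Cb0iVwQwYgrCORz0enmzKgG_XZOHhbKgDuH_wh3N_47Jza3lMXCmespg___spec : Claim_equal_gAAAAABmvnuPNZUGaLglawhsuL6CWM12r4CIhs8FM4Cb0iVwQwYgrCORz0enmzKgG_XZOHhbKgDuH_wh3N_47Jza3lMXCmespg__ := by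
  intro text _
  unfold Spec_gAAAAABmvnuPNZUGaLglawhsuL6CWM12r4CIhs8FM4Cb0iVwQwYgrCORz0enmzKgG_XZOHhbKgDuH_wh3N_47Jza3lMXCmespg__ gAAAAABmvnuPNZUGaLglawhsuL6CWM12r4CIhs8FM4Cb0iVwQwYgrCORz0enmzKgG_XZOHhbKgDuH_wh3N_47Jza3lMXCmespg__ gAAAAABmvnuPNZUGaLglawhsuL6CWM12r4CIhs8FM4Cb0iVwQwYgrCORz0enmzKgG_XZOHhbKgDuH_wh3N_47Jza3lMXCmespg___alt
  rw [pvFindLoop_eq]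
  simp
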